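-- pv_equiv track=rewrite | github.com/tradestreamhq/tradestream | services/strategy_discovery_request_factory/config.py | validate_fibonacci_windows
-- ===== SOURCE A (Python) =====
-- MIN_FIBONACCI_WINDOW_MINUTES = 5        # Minimum meaningful window size
--
-- MAX_FIBONACCI_WINDOW_MINUTES = 525600   # 1 year in minutes
--
-- def validate_fibonacci_windows(windows: list) -> bool:
--     """Validate Fibonacci windows configuration."""
--     if not windows:
--         return False
--
--     for window in windows:
--         if not isinstance(window, int):
--             return False
--         if window < MIN_FIBONACCI_WINDOW_MINUTES or window > MAX_FIBONACCI_WINDOW_MINUTES: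
--             return False
--
--     # Check if sorted
--     return windows == sorted(windows)
-- ===== SOURCE B (Python) =====
-- MIN_FIBONACCI_WINDOW_MINUTES = 5
-- MAX_FIBONACCI_WINDOW_MINUTES = 525600
--
--
-- def validate_fibonacci_windows(windows: list) -> bool:
--     """Validate Fibonacci windows: single pass over adjacent pairs, no sorting."""
--     if not windows:
--         return False
--     prev = None
--     for window in windows:
--         if not isinstance(window, int):
--             return False
--         if window < MIN_FIBONACCI_WINDOW_MINUTES or window > MAX_FIBONACCI_WINDOW_MINUTES:
--             return False
--         if prev is not None and window < prev:
--             return False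
--         prev = window
--     return True
-- ===== Notes on version B (the rewrite author's own statement) =====
-- stated objective: alternative
-- what changed: Replaces the validate-then-sort-and-compare structure with a single linear pass that checks type, range and adjacent-pair non-decreasing order together, without sorting.
import Mathlib
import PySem

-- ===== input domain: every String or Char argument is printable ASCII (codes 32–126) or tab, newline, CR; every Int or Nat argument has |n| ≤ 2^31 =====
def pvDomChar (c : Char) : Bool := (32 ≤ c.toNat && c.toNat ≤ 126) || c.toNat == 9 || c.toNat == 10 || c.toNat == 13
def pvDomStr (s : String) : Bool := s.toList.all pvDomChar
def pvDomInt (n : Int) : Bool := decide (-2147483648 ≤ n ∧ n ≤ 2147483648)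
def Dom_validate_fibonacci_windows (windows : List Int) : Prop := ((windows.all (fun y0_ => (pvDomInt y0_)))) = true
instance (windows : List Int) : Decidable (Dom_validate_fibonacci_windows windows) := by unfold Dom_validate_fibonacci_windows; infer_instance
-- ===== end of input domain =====

-- B replaces A's sort-and-compare sortedness check with a single linear pass
-- over adjacent pairs (alternative algorithm, one traversal instead of loop+sort;
-- the isinstance branch is vacuous for List Int under the type convention).
-- ===== PORT A =====
def validate_fibonacci_windows (windows : List Int) : Bool :=
  if windows.isEmpty then false
  else if windows.all (fun w => !(decide (w < 5) || decide (w > 525600))) then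
    -- windows == sorted(windows)
    decide (windows = PySem.List.sorted windows (fun x => x) false)
  else false

-- ===== PORT B =====
-- the for-loop of Source B with its `prev` accumulator
def pvAltLoop (prev : Option Int) (l : List Int) : Bool :=
  match l with
  | [] => true
  | w :: rest =>
    if decide (w < 5) || decide (w > 525600) then false
    else match prev with
      | some p => if decide (w < p) then false else pvAltLoop (some w) rest
      | none => pvAltLoop (some w) rest

def validate_fibonacci_windows_alt (windows : List Int) : Bool :=
  if windows.isEmpty then false
  else pvAltLoop none windows

-- ===== PRECONDITION & SPEC =====
def Spec_validate_fibonacci_windows (windows : List Int) (out : Bool) : Prop := out = validate_fibonacci_windows_alt windows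
instance (windows : List Int) (out : Bool) : Decidable (Spec_validate_fibonacci_windows windows out) := by unfold Spec_validate_fibonacci_windows; infer_instance

-- ===== CLAIM (what is proved, stated in full; the proofs are below) =====
def Claim_equal_validate_fibonacci_windows : Prop := ∀ (windows : List Int), Dom_validate_fibonacci_windows windows → Spec_validate_fibonacci_windows windows (validate_fibonacci_windows windows)

-- ===== LEMMAS AND PROOFS =====


def pvInRange (w : Int) : Prop := 5 ≤ w ∧ w ≤ 525600

theorem pvRange_bool (w : Int) :
    (!(decide (w < 5) || decide (w > 525600))) = true ↔ pvInRange w := by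
  unfold pvInRange; simp

theorem pvAltLoop_some_iff (l : List Int) : ∀ (p : Int),
    pvAltLoop (some p) l = true ↔
      ((∀ w ∈ l, pvInRange w) ∧ List.Pairwise (· ≤ ·) (p :: l)) := by
  induction l with
  | nil => intro p; simp [pvAltLoop]
  | cons a t ih =>
    intro p
    simp only [pvAltLoop]
    by_cases h1 : a < 5
    · simp [pvInRange, h1]
    · by_cases h2 : a > 525600
      · simp [pvInRange, h2]
      · by_cases h3 : a < p
        · simp [h1, h2, h3, List.pairwise_cons]
        · simp only [h1, h2, h3, decide_false, Bool.or_self, Bool.false_eq_true, if_false]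
          rw [ih a]
          constructor
          · rintro ⟨hr, hp⟩
            refine ⟨?_, List.pairwise_cons.mpr ⟨?_, hp⟩⟩
            · intro w hw
              rcases List.mem_cons.mp hw with rfl | hw
              · exact ⟨by omega, by omega⟩
              · exact hr w hw
            · intro b hb
              rcases List.mem_cons.mp hb with rfl | hb
              · omega
              · exact le_trans (by omega : p ≤ a) ((List.pairwise_cons.mp hp).1 b hb)
          · rintro ⟨hr, hp⟩
            exact ⟨fun w hw => hr w (by simp [hw]), (List.pairwise_cons.mp hp).2⟩

theorem pv_sorted_iff_pairwise (l : List Int) :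
    (l = PySem.List.sorted l (fun x => x) false) ↔ List.Pairwise (· ≤ ·) l := by
  constructor
  · intro h
    have := PySem.List.sorted_pairwise (xs := l) (key := fun x => x)
    rw [← h] at this
    exact this
  · intro h
    exact (PySem.List.sorted_eq_self_of_pairwise (xs := l) (key := fun x => x) h).symm

theorem pvA_iff (windows : List Int) :
    validate_fibonacci_windows windows = true ↔
      windows ≠ [] ∧ (∀ w ∈ windows, pvInRange w) ∧ List.Pairwise (· ≤ ·) windows := by
  unfold validate_fibonacci_windows
  cases windows with
  | nil => simp
  | cons a t =>
    simp only [List.isEmpty_cons, Bool.false_eq_true, if_false, ne_eq,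
      reduceCtorEq, not_false_eq_true, true_and]
    by_cases hall : ((a :: t).all (fun w => !(decide (w < 5) || decide (w > 525600)))) = true
    · rw [if_pos hall, decide_eq_true_iff, pv_sorted_iff_pairwise]
      have : ∀ w ∈ a :: t, pvInRange w := by
        intro w hw
        exact (pvRange_bool w).mp (List.all_eq_true.mp hall w hw)
      constructor
      · intro h; exact ⟨this, h⟩
      · exact fun h => h.2
    · rw [if_neg hall]
      simp only [Bool.false_eq_true, false_iff]
      rintro ⟨hr, _⟩
      exact hall (List.all_eq_true.mpr (fun w hw => (pvRange_bool w).mpr (hr w hw)))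

theorem pvB_iff (windows : List Int) :
    validate_fibonacci_windows_alt windows = true ↔
      windows ≠ [] ∧ (∀ w ∈ windows, pvInRange w) ∧ List.Pairwise (· ≤ ·) windows := by
  unfold validate_fibonacci_windows_alt
  cases windows with
  | nil => simp
  | cons a t =>
    simp only [List.isEmpty_cons, Bool.false_eq_true, if_false, ne_eq,
      reduceCtorEq, not_false_eq_true, true_and, pvAltLoop]
    by_cases h1 : a < 5
    · simp [pvInRange, h1]
    · by_cases h2 : a > 525600
      · simp [pvInRange, h2]
      · simp only [h1, h2, decide_false, Bool.or_self, Bool.false_eq_true, if_false]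
        rw [pvAltLoop_some_iff t a]
        constructor
        · rintro ⟨hr, hp⟩
          refine ⟨?_, hp⟩
          intro w hw
          rcases List.mem_cons.mp hw with rfl | hw
          · exact ⟨by omega, by omega⟩
          · exact hr w hw
        · rintro ⟨hr, hp⟩
          exact ⟨fun w hw => hr w (by simp [hw]), hp⟩

-- ===== VERDICT (by name: the statement is the Claim_ definition above) =====
theorem validate_fibonacci_windows_spec : Claim_equal_validate_fibonacci_windows := by
  intro windows _
  unfold Spec_validate_fibonacci_windows
  rw [Bool.eq_iff_iff, pvA_iff, pvB_iff]
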